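-- pv_equiv track=rewrite | github.com/G-Aleixo/Guerra-de-cores | minimax.py | get_positional_scores
-- ===== SOURCE A (Python) =====
-- def get_positional_scores(board_size: int) -> list[list[int]]:
--     values = [[2 for _ in range(board_size)] for _ in range(board_size)]
--
--     for i in range(board_size):
--         for j in range(board_size):
--             if i != 0 and i != board_size - 1:
--                 values[i][j] += 1
--             if j != 0 and j != board_size - 1:
--                 values[i][j] += 1
--     return values
-- ===== SOURCE B (Python) =====
-- def get_positional_scores(board_size: int) -> list[list[int]]:
--     # The grid has only two kinds of rows: the first/last ("edge") row and the
--     # interior row.  Build each template once from its border cells and interior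
--     # run, then assemble the board by replication -- no per-cell condition tests.
--     if board_size <= 0:
--         return []
--     if board_size == 1:
--         return [[2]]
--     m = board_size - 2
--     edge = [2] + [3] * m + [2]
--     inner = [3] + [4] * m + [3]
--     return [edge] + [list(inner) for _ in range(m)] + [list(edge)]
-- ===== Notes on version B (the rewrite author's own statement) =====
-- stated objective: alternative
-- what changed: B builds two template rows (edge and interior) once by concatenating border cells with a replicated interior run and assembles the board by replicating them, removing A's per-cell branch tests and per-cell mutation of a grid of twos.
import Mathlib
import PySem

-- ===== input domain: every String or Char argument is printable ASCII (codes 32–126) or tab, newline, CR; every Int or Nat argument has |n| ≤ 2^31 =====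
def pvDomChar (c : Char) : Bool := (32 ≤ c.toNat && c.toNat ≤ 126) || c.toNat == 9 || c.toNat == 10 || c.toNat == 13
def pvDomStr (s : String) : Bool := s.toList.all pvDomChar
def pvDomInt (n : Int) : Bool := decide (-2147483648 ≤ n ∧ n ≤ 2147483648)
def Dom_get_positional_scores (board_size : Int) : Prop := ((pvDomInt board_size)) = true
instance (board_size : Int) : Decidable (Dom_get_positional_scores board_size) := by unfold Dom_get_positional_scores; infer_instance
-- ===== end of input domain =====

-- ===== PORT A =====
-- B assembles the board from two template rows built by concatenation/replication,
-- instead of A's per-cell double loop with two conditionals (objective: alternative).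

-- values[i][j] += 1  (list assignment through nested modify; indices produced by range are in bounds)
def pvBump (v : List (List Int)) (i j : Int) : List (List Int) :=
  v.modify i.toNat (fun row => row.modify j.toNat (fun x => x + 1))

def get_positional_scores (board_size : Int) : List (List Int) :=
  let values := (PySem.List.pyRange 0 board_size 1).map
    (fun _ => (PySem.List.pyRange 0 board_size 1).map (fun _ => (2 : Int)))
  (PySem.List.pyRange 0 board_size 1).foldl (fun v i =>
    (PySem.List.pyRange 0 board_size 1).foldl (fun v j =>
      let v := if i ≠ 0 ∧ i ≠ board_size - 1 then pvBump v i j else v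
      if j ≠ 0 ∧ j ≠ board_size - 1 then pvBump v i j else v) v) values

-- ===== PORT B =====
def get_positional_scores_alt (board_size : Int) : List (List Int) :=
  if board_size ≤ 0 then []
  else if board_size = 1 then [[2]]
  else
    -- m = board_size - 2; [x] * m is List.replicate; '+' on lists is '++'
    let m := (board_size - 2).toNat
    let edge := [2] ++ List.replicate m (3 : Int) ++ [2]
    let inner := [3] ++ List.replicate m (4 : Int) ++ [3]
    [edge] ++ List.replicate m inner ++ [edge]

-- ===== PRECONDITION & SPEC =====
def Spec_get_positional_scores (board_size : Int) (out : List (List Int)) : Prop := out = get_positional_scores_alt board_size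
instance (board_size : Int) (out : List (List Int)) : Decidable (Spec_get_positional_scores board_size out) := by unfold Spec_get_positional_scores; infer_instance

-- ===== CLAIM (what is proved, stated in full; the proofs are below) =====
def Claim_equal_get_positional_scores : Prop := ∀ (board_size : Int), Dom_get_positional_scores board_size → Spec_get_positional_scores board_size (get_positional_scores board_size)

-- ===== LEMMAS AND PROOFS =====

-- interior bonus of index k on an n-sized board
def pvBon (n k : Int) : Int := if k ≠ 0 ∧ k ≠ n - 1 then 1 else 0

theorem pv_modify_id {α : Type} (l : List α) (i : Nat) : l.modify i (fun x => x) = l := by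
  induction l generalizing i with
  | nil => simp
  | cons a t ih => cases i <;> simp [List.modify_succ_cons, ih]

theorem pv_modify_modify {α : Type} (l : List α) (i : Nat) (f g : α → α) :
    (l.modify i f).modify i g = l.modify i (fun x => g (f x)) := by
  induction l generalizing i with
  | nil => simp
  | cons a t ih => cases i <;> simp [List.modify_succ_cons, ih]

-- folding a modify at a FIXED index composes into one modify
theorem pv_foldl_modify_fixed {α β : Type} (g : β → α → α) (l : List β) (v : List α) (i : Nat) :
    l.foldl (fun v b => v.modify i (g b)) v
      = v.modify i (fun x => l.foldl (fun x b => g b x) x) := by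
  induction l generalizing v with
  | nil => simp [pv_modify_id]
  | cons b t ih => simp [List.foldl_cons, ih, pv_modify_modify]

theorem pv_foldl_modify_map_succ {α : Type} (f : Nat → α → α) (l : List Nat) (a : α) (t : List α) :
    (l.map Nat.succ).foldl (fun v i => v.modify i (f i)) (a :: t)
      = a :: l.foldl (fun v i => v.modify i (f (i + 1))) t := by
  induction l generalizing t with
  | nil => rfl
  | cons i l ih =>
    simp only [List.map_cons, List.foldl_cons, show Nat.succ i = i + 1 from rfl,
      List.modify_succ_cons, ih]

-- folding modify over range(length) is mapIdx
theorem pv_foldl_modify_range {α : Type} (f : Nat → α → α) (xs : List α) :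
    (List.range xs.length).foldl (fun v i => v.modify i (f i)) xs = xs.mapIdx f := by
  induction xs generalizing f with
  | nil => rfl
  | cons a t ih =>
    simp only [List.length_cons, List.range_succ_eq_map, List.foldl_cons, List.mapIdx_cons]
    have h0 : (a :: t).modify 0 (f 0) = f 0 a :: t := by simp
    rw [h0, pv_foldl_modify_map_succ, ih (fun i x => f (i + 1) x)]

theorem pv_foldl_modify_range' {α : Type} (f : Nat → α → α) (xs : List α) (m : Nat)
    (h : xs.length = m) :
    (List.range m).foldl (fun v i => v.modify i (f i)) xs = xs.mapIdx f := by
  subst h; exact pv_foldl_modify_range f xs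

-- pyRange 0 n 1 as a Nat range
theorem pv_pyRange_nat (n : Int) :
    PySem.List.pyRange 0 n 1 = (List.range n.toNat).map (fun k : Nat => (k : Int)) := by
  rw [PySem.List.pyRange_one]
  simp

-- one step of A's inner loop, as a single modify
theorem pv_step (n i j : Int) (v : List (List Int)) :
    (let v' := if i ≠ 0 ∧ i ≠ n - 1 then pvBump v i j else v
     if j ≠ 0 ∧ j ≠ n - 1 then pvBump v' i j else v')
    = v.modify i.toNat (fun row => row.modify j.toNat (fun x => x + pvBon n i + pvBon n j)) := by
  simp only [pvBump, pvBon]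
  split_ifs with h1 h2 h2 <;> simp [pv_modify_modify, pv_modify_id]

-- A's result, in closed map form
theorem pv_A_eq (n : Int) :
    get_positional_scores n
      = (List.range n.toNat).map (fun i : Nat =>
          (List.range n.toNat).map (fun j : Nat =>
            2 + pvBon n (i : Int) + pvBon n (j : Int))) := by
  unfold get_positional_scores
  have h1 : (fun (v : List (List Int)) (i : Int) =>
      List.foldl (fun v j =>
        let v' := if i ≠ 0 ∧ i ≠ n - 1 then pvBump v i j else v
        if j ≠ 0 ∧ j ≠ n - 1 then pvBump v' i j else v') v (PySem.List.pyRange 0 n 1))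
    = fun v i => v.modify i.toNat (fun row =>
        List.foldl (fun row (j : Int) =>
          row.modify j.toNat (fun x => x + pvBon n i + pvBon n j)) row
          (PySem.List.pyRange 0 n 1)) := by
    funext v i
    have h2 : (fun (v : List (List Int)) (j : Int) =>
        let v' := if i ≠ 0 ∧ i ≠ n - 1 then pvBump v i j else v
        if j ≠ 0 ∧ j ≠ n - 1 then pvBump v' i j else v')
      = fun v j => v.modify i.toNat
          (fun row => row.modify j.toNat (fun x => x + pvBon n i + pvBon n j)) := by
      funext v j; exact pv_step n i j v
    rw [h2, pv_foldl_modify_fixed]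
  rw [h1, pv_pyRange_nat, List.foldl_map]
  simp only [List.foldl_map, Int.toNat_natCast, List.map_map]
  rw [pv_foldl_modify_range' _ _ n.toNat (by simp)]
  apply List.ext_getElem (by simp)
  intro i hi hi'
  simp only [List.getElem_mapIdx, List.getElem_map]
  rw [pv_foldl_modify_range' _ _ n.toNat (by simp)]
  apply List.ext_getElem (by simp)
  intro j hj hj'
  simp [Function.comp]

-- range (m+2) split into first, middle and last index
theorem pv_range_two_add (m : Nat) :
    List.range (m + 2) = 0 :: ((List.range m).map (· + 1) ++ [m + 1]) := by
  rw [List.range_succ, List.range_succ_eq_map]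
  simp

theorem pv_map_range_decomp {α : Type} (m : Nat) (g : Nat → α) :
    (List.range (m + 2)).map g
      = g 0 :: ((List.range m).map (fun k => g (k + 1)) ++ [g (m + 1)]) := by
  rw [pv_range_two_add]
  simp [List.map_map, Function.comp]

theorem pv_map_const_replicate {α : Type} (m : Nat) (g : Nat → α) (v : α)
    (h : ∀ k, k < m → g k = v) :
    (List.range m).map g = List.replicate m v := by
  apply List.ext_getElem (by simp)
  intro i hi hi'
  simp only [List.getElem_map, List.getElem_range, List.getElem_replicate]
  exact h i (by simpa using hi)

-- one row of the closed map form, for n ≥ 2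
theorem pv_row (n : Int) (m : Nat) (hm : (m : Int) + 2 = n) (a : Int) :
    (List.range (m + 2)).map (fun j : Nat => a + pvBon n (j : Int))
      = a :: (List.replicate m (a + 1) ++ [a]) := by
  rw [pv_map_range_decomp]
  have h0 : pvBon n ((0 : Nat) : Int) = 0 := by
    simp [pvBon]
  have hlast : pvBon n (((m + 1 : Nat)) : Int) = 0 := by
    simp only [pvBon]
    rw [if_neg]
    push_cast
    omega
  rw [h0, hlast]
  congr 1
  · omega
  · congr 1
    · apply pv_map_const_replicate
      intro k hk
      have hb : pvBon n (((k + 1 : Nat)) : Int) = 1 := by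
        simp only [pvBon]
        rw [if_pos]
        constructor <;> [push_cast; push_cast] <;> omega
      rw [hb]
    · congr 1
      omega

-- B's result, in the same closed map form
theorem pv_B_eq (n : Int) :
    get_positional_scores_alt n
      = (List.range n.toNat).map (fun i : Nat =>
          (List.range n.toNat).map (fun j : Nat =>
            2 + pvBon n (i : Int) + pvBon n (j : Int))) := by
  unfold get_positional_scores_alt
  by_cases h0 : n ≤ 0
  · rw [if_pos h0]
    have : n.toNat = 0 := by omega
    simp [this]
  · rw [if_neg h0]
    by_cases h1 : n = 1
    · subst h1
      rw [if_pos rfl]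
      decide
    · rw [if_neg h1]
      obtain ⟨m, hm⟩ : ∃ m : Nat, (m : Int) + 2 = n := ⟨(n - 2).toNat, by omega⟩
      have hN : n.toNat = m + 2 := by omega
      have hM : (n - 2).toNat = m := by omega
      rw [hN, hM]
      have hrow : ∀ i : Nat,
          (List.range (m + 2)).map (fun j : Nat => 2 + pvBon n (i : Int) + pvBon n (j : Int))
            = (2 + pvBon n (i : Int)) ::
              (List.replicate m (2 + pvBon n (i : Int) + 1) ++ [2 + pvBon n (i : Int)]) :=
        fun i => pv_row n m hm (2 + pvBon n (i : Int))
      rw [pv_map_range_decomp]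
      simp only [hrow]
      have b0 : pvBon n ((0 : Nat) : Int) = 0 := by simp [pvBon]
      have blast : pvBon n (((m + 1 : Nat)) : Int) = 0 := by
        simp only [pvBon]; rw [if_neg]; push_cast; omega
      have hmid : (List.range m).map (fun k : Nat =>
          (2 + pvBon n ((k + 1 : Nat) : Int)) ::
            (List.replicate m (2 + pvBon n ((k + 1 : Nat) : Int) + 1)
              ++ [2 + pvBon n ((k + 1 : Nat) : Int)]))
          = List.replicate m ((3 : Int) :: (List.replicate m (4 : Int) ++ [3])) := by
        apply pv_map_const_replicate
        intro k hk
        have hb : pvBon n (((k + 1 : Nat)) : Int) = 1 := by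
          simp only [pvBon]
          rw [if_pos]
          constructor <;> push_cast <;> omega
        rw [hb]
        norm_num
      rw [b0, blast, hmid]
      norm_num

-- ===== VERDICT (by name: the statement is the Claim_ definition above) =====
theorem get_positional_scores_spec : Claim_equal_get_positional_scores := by
  intro n _
  unfold Spec_get_positional_scores
  rw [pv_A_eq, pv_B_eq]
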